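-- pv_equiv track=rewrite | github.com/shah78677/ai_programs | crossword.py | capitalize_word_in_crossword
-- ===== SOURCE A (Python) =====
-- def capitalize_word_in_crossword(crosswords, words):
--     for rownum, row in enumerate(crosswords):
--         for word in words:
--             find_index=''.join(row).lower().find(word)
--             if find_index > 0:
--                 for i in range(find_index, len(word) + 1):
--                     crosswords[rownum][i] = crosswords[rownum][i].upper()
--
--     for colindex in range(len(crosswords[0])):
--         for word in words:
--             colvalues=[row[colindex] for row in crosswords]
--             find_index=''.join(colvalues).lower().find(word)
--             if find_index > 0:
--                 for i in range(find_index, len(word) + 1):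
--                     crosswords[i][colindex] = crosswords[i][colindex].upper()
--     return crosswords
-- ===== SOURCE B (Python) =====
-- # B: mark-then-rewrite. All match spans are computed up front from the LOWERED
-- # original lines (one join per row, columns taken once via zip), valid because
-- # lower() erases the uppercasing A interleaves; then a single write pass
-- # uppercases exactly the marked cells. Mutates `crosswords` in place like A.
--
-- def _upper_spans(line_strings, words):
--     # set of positions to uppercase in one line (A's quirky span rule kept)
--     s = ''.join(line_strings).lower()
--     marked = set()
--     for w in words:
--         k = s.find(w)
--         if k > 0:
--             marked.update(range(k, len(w) + 1))
--     return marked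
--
-- def capitalize_word_in_crossword(crosswords, words):
--     row_marks = [_upper_spans(row, words) for row in crosswords]
--     col_marks = [_upper_spans(list(col), words) for col in zip(*crosswords)]
--     for r, row in enumerate(crosswords):
--         marks = row_marks[r]
--         for c in range(len(row)):
--             if c in marks or (c < len(col_marks) and r in col_marks[c]):
--                 row[c] = row[c].upper()
--     return crosswords
-- ===== Notes on version B (the rewrite author's own statement) =====
-- stated objective: faster
-- what changed: A searches and uppercases interleaved, re-joining each row per word and re-extracting each column per word while mutating as it goes; B first computes, from the lowered ORIGINAL lines (one join+lower per row, columns taken once via zip), the set of cell positions each word marks, then does one write pass uppercasing exactly the marked cells -- correct because lower() erases A's interleaved uppercasing, so all finds are order-independent.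
import Mathlib
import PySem

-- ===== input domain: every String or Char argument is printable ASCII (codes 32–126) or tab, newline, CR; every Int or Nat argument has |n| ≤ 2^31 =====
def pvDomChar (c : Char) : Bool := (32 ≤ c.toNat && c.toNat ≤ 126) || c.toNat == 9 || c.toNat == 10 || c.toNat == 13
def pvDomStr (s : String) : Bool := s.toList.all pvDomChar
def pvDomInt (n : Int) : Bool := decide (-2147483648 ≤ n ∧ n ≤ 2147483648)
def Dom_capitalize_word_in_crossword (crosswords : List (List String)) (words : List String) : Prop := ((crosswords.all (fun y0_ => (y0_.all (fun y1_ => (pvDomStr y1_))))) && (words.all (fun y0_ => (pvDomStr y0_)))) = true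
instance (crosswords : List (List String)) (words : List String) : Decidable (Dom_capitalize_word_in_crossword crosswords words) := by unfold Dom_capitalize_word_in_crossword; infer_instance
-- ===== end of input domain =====

-- A interleaves searching and uppercasing, rebuilding each row/column per word; B first computes
-- all marked cell positions from the lowered original lines and then uppercases them in one pass.
-- Both Pythons mutate `crosswords` in place — the equivalence proved here is about the return value.

-- ===== PORT A =====
-- crosswords[rownum][i] = crosswords[rownum][i].upper()  (read may raise → none → unchanged, outside Pre_)
def pvUpAt (row : List String) (i : Int) : List String :=
  match PySem.List.pyGet? row i with
  | some s => PySem.List.pySetD row i (PySem.Str.upper s)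
  | none => row

-- one word processed against one row of A's first pass
def pvRowWord (row : List String) (w : String) : List String :=
  let f := PySem.Str.find (PySem.Str.lower (PySem.Str.join "" row)) w
  if 0 < f then (PySem.List.pyRange f (PySem.Str.len w + 1) 1).foldl pvUpAt row else row

-- crosswords[i][colindex] = crosswords[i][colindex].upper()
def pvCellUp (g : List (List String)) (i c : Int) : List (List String) :=
  match PySem.List.pyGet? g i with
  | some row => PySem.List.pySetD g i (pvUpAt row c)
  | none => g

-- one word processed against one column (colvalues rebuilt per word, as in A)
def pvColWord (g : List (List String)) (c : Int) (w : String) : List (List String) :=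
  let col := g.map (fun row => PySem.List.pyGetD row c "")
  let f := PySem.Str.find (PySem.Str.lower (PySem.Str.join "" col)) w
  if 0 < f then (PySem.List.pyRange f (PySem.Str.len w + 1) 1).foldl (fun g i => pvCellUp g i c) g
  else g

def capitalize_word_in_crossword (crosswords : List (List String)) (words : List String) : List (List String) :=
  let g1 := (List.range crosswords.length).foldl
    (fun g r => g.set r (words.foldl pvRowWord (g.getD r []))) crosswords
  (PySem.List.pyRange 0 ((g1.getD 0 []).length : Int) 1).foldl
    (fun g c => words.foldl (fun g w => pvColWord g c w) g) g1

-- ===== PORT B =====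
-- _upper_spans: the set of positions one line's matches mark (A's quirky span rule kept)
def pvLineSpans (line : List String) (words : List String) : PySem.Set Int :=
  let s := PySem.Str.lower (PySem.Str.join "" line)
  words.foldl (fun m w =>
    let k := PySem.Str.find s w
    if 0 < k then (PySem.List.pyRange k (PySem.Str.len w + 1) 1).foldl (fun m i => PySem.Set.add m i) m
    else m) (PySem.Set.ofList [])

-- zip(*crosswords): columns truncated to the shortest row (port of the zip builtin)
def pvMinLen : List (List String) → Nat
  | [] => 0
  | [r] => r.length
  | r :: s :: rs => min r.length (pvMinLen (s :: rs))

def pvZipCols (g : List (List String)) : List (List String) :=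
  (List.range (pvMinLen g)).map (fun c => g.map (fun row => row.getD c ""))

def capitalize_word_in_crossword_alt (crosswords : List (List String)) (words : List String) : List (List String) :=
  let rowMarks := crosswords.map (fun row => pvLineSpans row words)
  let colMarks := (pvZipCols crosswords).map (fun col => pvLineSpans col words)
  crosswords.mapIdx (fun r row =>
    let marks := rowMarks.getD r []
    (List.range row.length).foldl (fun row (c : Nat) =>
      if PySem.Set.contains marks ((c : Int)) ||
         (decide (c < colMarks.length) && PySem.Set.contains (colMarks.getD c []) (r : Int))
      then row.set c (PySem.Str.upper (row.getD c ""))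
      else row) row)

-- ===== PRECONDITION & SPEC =====
-- Pre_ excludes exactly the inputs on which A raises IndexError: the empty grid; a ragged grid
-- (some row shorter than row 0) when words is nonempty, where A's column extraction indexes past
-- the short row; and a matched word span running past a row edge or the grid's bottom edge.
def Pre_capitalize_word_in_crossword (crosswords : List (List String)) (words : List String) : Prop :=
  crosswords ≠ [] ∧
  (words = [] ∨ (∀ row ∈ crosswords, (crosswords.headD []).length ≤ row.length)) ∧
  (∀ row ∈ crosswords, ∀ w ∈ words,
    ¬ (0 < PySem.Str.find (PySem.Str.lower (PySem.Str.join "" row)) w ∧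
       PySem.Str.find (PySem.Str.lower (PySem.Str.join "" row)) w ≤ PySem.Str.len w ∧
       (row.length : Int) ≤ PySem.Str.len w)) ∧
  (∀ c ∈ List.range (crosswords.headD []).length, ∀ w ∈ words,
    ¬ (0 < PySem.Str.find (PySem.Str.lower (PySem.Str.join ""
            (crosswords.map (fun row => PySem.List.pyGetD row (c : Int) "")))) w ∧
       PySem.Str.find (PySem.Str.lower (PySem.Str.join ""
            (crosswords.map (fun row => PySem.List.pyGetD row (c : Int) "")))) w ≤ PySem.Str.len w ∧
       (crosswords.length : Int) ≤ PySem.Str.len w))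
instance (crosswords : List (List String)) (words : List String) : Decidable (Pre_capitalize_word_in_crossword crosswords words) := by
  unfold Pre_capitalize_word_in_crossword; infer_instance

def pvWitness_capitalize_word_in_crossword : List (List String) × List String :=
  ([["c", "a", "t"], ["a", "x", "y"], ["t", "z", "w"]], ["at"])

def Spec_capitalize_word_in_crossword (crosswords : List (List String)) (words : List String) (out : List (List String)) : Prop := out = capitalize_word_in_crossword_alt crosswords words
instance (crosswords : List (List String)) (words : List String) (out : List (List String)) : Decidable (Spec_capitalize_word_in_crossword crosswords words out) := by unfold Spec_capitalize_word_in_crossword; infer_instance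

-- ===== CLAIM (what is proved, stated in full; the proofs are below) =====
def Claim_equal_capitalize_word_in_crossword : Prop := ∀ (crosswords : List (List String)) (words : List String), Dom_capitalize_word_in_crossword crosswords words → Pre_capitalize_word_in_crossword crosswords words → Spec_capitalize_word_in_crossword crosswords words (capitalize_word_in_crossword crosswords words)


-- ===== LEMMAS AND PROOFS =====

-- ---- character-level facts: lower absorbs upper; upper is idempotent ----
theorem pv_char_le_iff (a c : Char) : a ≤ c ↔ a.toNat ≤ c.toNat := by
  constructor <;> intro h <;> exact h

theorem pv_lower_upperChar (c : Char) :
    PySem.Chars.lowerChar (PySem.Chars.upperChar c) = PySem.Chars.lowerChar c := by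
  have ha : ('a').toNat = 97 := rfl
  have hz : ('z').toNat = 122 := rfl
  have hA : ('A').toNat = 65 := rfl
  have hZ : ('Z').toNat = 90 := rfl
  simp only [PySem.Chars.lowerChar, PySem.Chars.upperChar, PySem.Chars.islower, PySem.Chars.isupper,
    Bool.and_eq_true, decide_eq_true_eq, pv_char_le_iff, ha, hz, hA, hZ]
  by_cases hl : 97 ≤ c.toNat ∧ c.toNat ≤ 122
  · rw [if_pos hl]
    have ht : (Char.ofNat (c.toNat - 32)).toNat = c.toNat - 32 := by
      rw [Char.toNat_ofNat, if_pos]; left; omega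
    rw [if_pos (by rw [ht]; omega), if_neg (by omega), ht]
    have h32 : c.toNat - 32 + 32 = c.toNat := by omega
    rw [h32, Char.ofNat_toNat]
  · rw [if_neg hl]

theorem pv_upper_upperChar (c : Char) :
    PySem.Chars.upperChar (PySem.Chars.upperChar c) = PySem.Chars.upperChar c := by
  have ha : ('a').toNat = 97 := rfl
  have hz : ('z').toNat = 122 := rfl
  simp only [PySem.Chars.upperChar, PySem.Chars.islower, Bool.and_eq_true, decide_eq_true_eq,
    pv_char_le_iff, ha, hz]
  by_cases hl : 97 ≤ c.toNat ∧ c.toNat ≤ 122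
  · rw [if_pos hl]
    have ht : (Char.ofNat (c.toNat - 32)).toNat = c.toNat - 32 := by
      rw [Char.toNat_ofNat, if_pos]; left; omega
    rw [if_neg (by rw [ht]; omega)]
  · rw [if_neg hl, if_neg hl]

theorem pv_str_ext {s t : String} (h : s.toList = t.toList) : s = t := String.toList_inj.mp h

theorem pv_upper_idem (s : String) : PySem.Str.upper (PySem.Str.upper s) = PySem.Str.upper s := by
  apply pv_str_ext
  simp [PySem.Str.toList_upper, PySem.Chars.upper, Function.comp, pv_upper_upperChar]

theorem pv_lower_upper_toList (s : String) :
    PySem.Chars.lower (PySem.Str.upper s).toList = PySem.Chars.lower s.toList := by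
  simp [PySem.Str.toList_upper, PySem.Chars.upper, PySem.Chars.lower, Function.comp, pv_lower_upperChar]

-- ---- the mark predicates (proof-side views of both programs' match rule) ----
def pvLowS (line : List String) : String := PySem.Str.lower (PySem.Str.join "" line)

def pvMarkW (s0 w : String) (i : Nat) : Bool :=
  decide (0 < PySem.Str.find s0 w) && decide (PySem.Str.find s0 w ≤ (i : Int)) &&
  decide ((i : Int) < (PySem.Str.len w : Int) + 1)

def pvMarkB (s0 : String) (ws : List String) (i : Nat) : Bool := ws.any (fun w => pvMarkW s0 w i)

def pvApply (p : Nat → Bool) (row : List String) : List String :=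
  row.mapIdx (fun i s => if p i then PySem.Str.upper s else s)

theorem pv_len_pvApply (p : Nat → Bool) (row : List String) : (pvApply p row).length = row.length := by
  simp [pvApply]

theorem pv_getElem_pvApply (p : Nat → Bool) (row : List String) (j : Nat)
    (h : j < (pvApply p row).length) :
    (pvApply p row)[j] = if p j then PySem.Str.upper (row[j]'(by simpa [pv_len_pvApply] using h)) else row[j]'(by simpa [pv_len_pvApply] using h) := by
  simp [pvApply]

-- pvApply composes by disjunction (upper is idempotent)
theorem pv_pvApply_pvApply (p q : Nat → Bool) (row : List String) :
    pvApply q (pvApply p row) = pvApply (fun i => p i || q i) row := by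
  apply List.ext_getElem
  · simp [pv_len_pvApply]
  · intro j h1 h2
    rw [pv_getElem_pvApply, pv_getElem_pvApply, pv_getElem_pvApply]
    cases hp : p j <;> cases hq : q j <;> simp [pv_upper_idem]

theorem pv_pvApply_false (row : List String) : pvApply (fun _ => false) row = row := by
  apply List.ext_getElem <;> simp [pvApply]

theorem pv_pvApply_congr {p q : Nat → Bool} (h : ∀ i, p i = q i) (row : List String) :
    pvApply p row = pvApply q row := by
  have : p = q := funext h
  rw [this]

-- lowered join is insensitive to pvApply (each cell keeps its lowercase form)
theorem pv_join_nil : ∀ (parts : List (List Char)), PySem.Chars.join [] parts = parts.flatten := by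
  intro parts
  induction parts with
  | nil => rfl
  | cons p ps ih =>
    cases ps with
    | nil => simp [PySem.Chars.join, List.intercalate]
    | cons q qs =>
      have step : List.intercalate ([]:List Char) (p::q::qs) = p ++ List.intercalate [] (q::qs) := rfl
      simp only [PySem.Chars.join] at *
      rw [step, ih]; simp

-- rows with pointwise-equal lowered cells have the same lowered join
theorem pv_lowS_congr (l l' : List String) (hlen : l.length = l'.length)
    (h : ∀ (i : Nat) (h1 : i < l.length) (h2 : i < l'.length),
      PySem.Chars.lower (l[i]).toList = PySem.Chars.lower (l'[i]).toList) :
    pvLowS l = pvLowS l' := by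
  apply pv_str_ext
  simp only [pvLowS, PySem.Str.toList_lower, PySem.Str.toList_join]
  have he : ("".toList : List Char) = [] := rfl
  rw [he, pv_join_nil, pv_join_nil]
  show PySem.Chars.lower _ = PySem.Chars.lower _
  simp only [PySem.Chars.lower, List.map_flatten, List.map_map]
  congr 1
  apply List.ext_getElem
  · simp [hlen]
  · intro i h1 h2
    simp only [List.getElem_map, Function.comp]
    exact h i (by simpa using h1) (by simpa using h2)

theorem pv_lowS_pvApply (p : Nat → Bool) (row : List String) :
    pvLowS (pvApply p row) = pvLowS row := by
  apply pv_lowS_congr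
  · simp [pvApply]
  · intro i h1 h2
    simp only [pvApply, List.getElem_mapIdx]
    split
    · exact pv_lower_upper_toList _
    · rfl

-- ---- A's row step is a pointwise marking ----
theorem pv_getElem?_pvUpAt (row : List String) (i : Int) (hi : 0 ≤ i) (j : Nat) :
    (pvUpAt row i)[j]? = if i = (j : Int) then (row[j]?).map PySem.Str.upper else row[j]? := by
  cases h : PySem.List.pyGet? row i with
  | none =>
    simp only [pvUpAt, h]
    rw [PySem.List.pyGet?_of_nonneg row hi] at h
    split
    · next hij =>
      subst hij
      simp_all
    · rfl
  | some s =>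
    simp only [pvUpAt, h]
    rw [PySem.List.pyGet?_of_nonneg row hi] at h
    rw [PySem.List.pySetD_of_nonneg row _ hi, List.getElem?_set]
    obtain ⟨hin, hEq⟩ := List.getElem?_eq_some_iff.1 h
    by_cases hij : i = (j : Int)
    · rw [if_pos hij, if_pos (by omega)]
      subst hij
      have hjs : row[j]? = some s := by simpa using h
      rw [if_pos hin, hjs]
      rfl
    · rw [if_neg (by omega), if_neg hij]

theorem pv_foldl_pvUpAt_getElem? (row : List String) (is : List Int) (hpos : ∀ i ∈ is, 0 ≤ i) (j : Nat) :
    (is.foldl pvUpAt row)[j]? = if ((j : Int) ∈ is) then (row[j]?).map PySem.Str.upper else row[j]? := by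
  induction is generalizing row with
  | nil => simp
  | cons i is ih =>
    have hi : 0 ≤ i := hpos i List.mem_cons_self
    simp only [List.foldl_cons]
    rw [ih (pvUpAt row i) (fun k hk => hpos k (List.mem_cons_of_mem _ hk))]
    by_cases hmem : (j : Int) ∈ is
    · rw [if_pos hmem, if_pos (List.mem_cons_of_mem _ hmem), pv_getElem?_pvUpAt row i hi j]
      by_cases hij : i = (j : Int)
      · rw [if_pos hij]
        cases hr : row[j]? <;> simp [pv_upper_idem]
      · rw [if_neg hij]
    · rw [if_neg hmem, pv_getElem?_pvUpAt row i hi j]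
      by_cases hij : i = (j : Int)
      · rw [if_pos hij, if_pos (by rw [← hij]; exact List.mem_cons_self)]
      · rw [if_neg hij, if_neg (by
          rw [List.mem_cons]
          push Not
          exact ⟨fun h => hij h.symm, hmem⟩)]

theorem pv_getElem?_pvApply (p : Nat → Bool) (row : List String) (j : Nat) :
    (pvApply p row)[j]? = if p j then (row[j]?).map PySem.Str.upper else row[j]? := by
  by_cases hj : j < row.length
  · have h2 : j < (pvApply p row).length := by simpa [pvApply] using hj
    rw [List.getElem?_eq_getElem h2, List.getElem?_eq_getElem hj]
    simp only [pvApply, List.getElem_mapIdx]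
    split <;> rfl
  · rw [List.getElem?_eq_none_iff.2 (show (pvApply p row).length ≤ j by simp [pvApply]; omega),
        List.getElem?_eq_none_iff.2 (show row.length ≤ j by omega)]
    split <;> rfl

theorem pv_rowWord_eq (row : List String) (w : String) :
    pvRowWord row w = pvApply (pvMarkW (pvLowS row) w) row := by
  simp only [pvRowWord]
  rw [show PySem.Str.lower (PySem.Str.join "" row) = pvLowS row from rfl]
  by_cases hf : 0 < PySem.Str.find (pvLowS row) w
  · rw [if_pos hf]
    apply List.ext_getElem?
    intro j
    rw [pv_foldl_pvUpAt_getElem? row _ (fun i hi => by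
          rcases PySem.List.mem_pyRange_one.1 hi with ⟨h1, _⟩; omega) j,
        pv_getElem?_pvApply]
    by_cases hmem : (j : Int) ∈ PySem.List.pyRange (PySem.Str.find (pvLowS row) w) (PySem.Str.len w + 1) 1
    · rcases PySem.List.mem_pyRange_one.1 hmem with ⟨h1, h2⟩
      rw [if_pos hmem, if_pos (by
        simp only [pvMarkW, Bool.and_eq_true, decide_eq_true_eq]
        exact ⟨⟨hf, h1⟩, h2⟩)]
    · rw [if_neg hmem, if_neg (by
        simp only [pvMarkW, Bool.and_eq_true, decide_eq_true_eq]
        rintro ⟨⟨-, h1⟩, h2⟩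
        exact hmem (PySem.List.mem_pyRange_one.2 ⟨h1, by exact_mod_cast h2⟩))]
  · rw [if_neg hf]
    have hfalse : ∀ i, pvMarkW (pvLowS row) w i = false := by
      intro i
      simp only [pvMarkW, decide_eq_false hf, Bool.false_and]
    rw [pv_pvApply_congr hfalse row, pv_pvApply_false]

theorem pv_rowFold_eq (ws : List String) : ∀ (row : List String),
    ws.foldl pvRowWord row = pvApply (pvMarkB (pvLowS row) ws) row := by
  induction ws with
  | nil =>
    intro row
    exact ((pv_pvApply_congr (fun _ => rfl) row).trans (pv_pvApply_false row)).symm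
  | cons w ws ih =>
    intro row
    simp only [List.foldl_cons]
    rw [pv_rowWord_eq, ih, pv_lowS_pvApply, pv_pvApply_pvApply]
    exact pv_pvApply_congr (fun i => by simp [pvMarkB, List.any_cons]) row

-- ---- B's span sets ----
theorem pv_mem_spanFold (s0 : String) : ∀ (ws : List String) (m : PySem.Set Int) (x : Int),
    x ∈ ws.foldl (fun m w =>
        let k := PySem.Str.find s0 w
        if 0 < k then (PySem.List.pyRange k (PySem.Str.len w + 1) 1).foldl (fun m i => PySem.Set.add m i) m
        else m) m
      ↔ x ∈ m ∨ ∃ w ∈ ws, (0 < PySem.Str.find s0 w ∧ PySem.Str.find s0 w ≤ x ∧ x < (PySem.Str.len w : Int) + 1) := by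
  intro ws
  induction ws with
  | nil => simp
  | cons w ws ih =>
    intro m x
    simp only [List.foldl_cons]
    rw [ih]
    by_cases hf : 0 < PySem.Str.find s0 w
    · rw [if_pos hf]
      have hmem : x ∈ (PySem.List.pyRange (PySem.Str.find s0 w) (PySem.Str.len w + 1) 1).foldl (fun m i => PySem.Set.add m i) m
          ↔ x ∈ m ∨ x ∈ PySem.List.pyRange (PySem.Str.find s0 w) (PySem.Str.len w + 1) 1 := by
        have := PySem.Set.mem_foldl_add (PySem.List.pyRange (PySem.Str.find s0 w) (PySem.Str.len w + 1) 1)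
          (fun (i : Int) => i) m x
        simpa using this
      rw [hmem]
      constructor
      · rintro (⟨hm | hr⟩ | ⟨w', hw', hcond⟩)
        · exact Or.inl hm
        · rcases PySem.List.mem_pyRange_one.1 hr with ⟨h1, h2⟩
          exact Or.inr ⟨w, List.mem_cons_self, hf, h1, h2⟩
        · exact Or.inr ⟨w', List.mem_cons_of_mem _ hw', hcond⟩
      · rintro (hm | ⟨w', hw', hcond⟩)
        · exact Or.inl (Or.inl hm)
        · rcases List.mem_cons.1 hw' with heq | htl
          · subst heq
            exact Or.inl (Or.inr (PySem.List.mem_pyRange_one.2 ⟨hcond.2.1, hcond.2.2⟩))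
          · exact Or.inr ⟨w', htl, hcond⟩
    · rw [if_neg hf]
      constructor
      · rintro (hm | ⟨w', hw', hcond⟩)
        · exact Or.inl hm
        · exact Or.inr ⟨w', List.mem_cons_of_mem _ hw', hcond⟩
      · rintro (hm | ⟨w', hw', hcond⟩)
        · exact Or.inl hm
        · rcases List.mem_cons.1 hw' with heq | htl
          · subst heq; exact absurd hcond.1 hf
          · exact Or.inr ⟨w', htl, hcond⟩

theorem pv_contains_lineSpans (line : List String) (ws : List String) (i : Nat) :
    PySem.Set.contains (pvLineSpans line ws) (i : Int) = pvMarkB (pvLowS line) ws i := by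
  have h1 : PySem.Set.contains (pvLineSpans line ws) (i : Int) = true ↔ pvMarkB (pvLowS line) ws i = true := by
    rw [PySem.Set.contains_iff]
    simp only [pvLineSpans]
    rw [pv_mem_spanFold (PySem.Str.lower (PySem.Str.join "" line)) ws (PySem.Set.ofList []) (i : Int)]
    simp only [pvMarkB, List.any_eq_true, pvMarkW, Bool.and_eq_true, decide_eq_true_eq]
    constructor
    · rintro (hm | ⟨w, hw, hc⟩)
      · simp [PySem.Set.ofList] at hm
      · exact ⟨w, hw, ⟨hc.1, hc.2.1⟩, hc.2.2⟩
    · rintro ⟨w, hw, ⟨hf, hle⟩, hlt⟩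
      exact Or.inr ⟨w, hw, hf, hle, hlt⟩
  cases hc : PySem.Set.contains (pvLineSpans line ws) (i : Int) with
  | true => exact (h1.1 hc).symm
  | false =>
    cases hb : pvMarkB (pvLowS line) ws i with
    | false => rfl
    | true =>
      have := h1.2 hb
      rw [hc] at this
      exact absurd this (by simp)

-- ---- B's write pass is a pointwise marking ----
theorem pv_rebuild_aux (p : Nat → Bool) (row : List String) :
    ∀ (k : Nat), k ≤ row.length →
      ((List.range k).foldl (fun row c =>
        if p c then row.set c (PySem.Str.upper (row.getD c "")) else row) row).length = row.length ∧
      (∀ (j : Nat), ((List.range k).foldl (fun row c =>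
        if p c then row.set c (PySem.Str.upper (row.getD c "")) else row) row)[j]?
          = if j < k ∧ p j then (row[j]?).map PySem.Str.upper else row[j]?) := by
  intro k
  induction k with
  | zero =>
    intro _
    refine ⟨rfl, fun j => ?_⟩
    rw [if_neg (by omega)]
    rfl
  | succ k ih =>
    intro hk
    obtain ⟨ihlen, ihget⟩ := ih (by omega)
    rw [List.range_succ, List.foldl_append]
    simp only [List.foldl_cons, List.foldl_nil]
    set G := (List.range k).foldl (fun row c =>
      if p c then row.set c (PySem.Str.upper (row.getD c "")) else row) row with hG
    have hGk : G.getD k "" = row.getD k "" := by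
      rw [List.getD_eq_getElem?_getD, List.getD_eq_getElem?_getD, ihget k, if_neg (by omega)]
    by_cases hp : p k
    · rw [if_pos hp]
      refine ⟨by rw [List.length_set, ihlen], fun j => ?_⟩
      rw [List.getElem?_set]
      by_cases hkj : k = j
      · subst hkj
        rw [if_pos rfl, if_pos (by rw [ihlen]; omega), if_pos ⟨by omega, hp⟩, hGk,
            List.getD_eq_getElem?_getD, List.getElem?_eq_getElem (by omega)]
        rfl
      · rw [if_neg hkj, ihget j]
        by_cases hjk : j < k ∧ p j
        · rw [if_pos hjk, if_pos ⟨by omega, hjk.2⟩]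
        · rw [if_neg hjk, if_neg (fun h2 => hjk ⟨by omega, h2.2⟩)]
    · rw [if_neg hp]
      refine ⟨ihlen, fun j => ?_⟩
      rw [ihget j]
      by_cases hjk : j < k ∧ p j
      · rw [if_pos hjk, if_pos ⟨by omega, hjk.2⟩]
      · rw [if_neg hjk, if_neg (by
          rintro ⟨hlt, hpj⟩
          by_cases hjk2 : j = k
          · rw [hjk2] at hpj; rw [hpj] at hp; exact absurd hp (by simp)
          · exact hjk ⟨by omega, hpj⟩)]

theorem pv_rebuild_eq (p : Nat → Bool) (row : List String) :
    (List.range row.length).foldl (fun row c =>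
      if p c then row.set c (PySem.Str.upper (row.getD c "")) else row) row = pvApply p row := by
  apply List.ext_getElem?
  intro j
  rw [(pv_rebuild_aux p row row.length le_rfl).2 j, pv_getElem?_pvApply]
  by_cases hj : j < row.length
  · by_cases hp : p j
    · rw [if_pos ⟨hj, hp⟩, if_pos hp]
    · rw [if_neg (fun h => hp h.2), if_neg hp]
  · rw [List.getElem?_eq_none_iff.2 (by omega)]
    by_cases hp : p j
    · rw [if_neg (fun h => hj h.1), if_pos hp]
      rfl
    · rw [if_neg (fun h => hj h.1), if_neg hp]

-- ---- generic list machinery (shared with the column phase) ----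
theorem pv_len_foldl {α β : Type} (F : List α → β → List α)
    (hF : ∀ r b, (F r b).length = r.length) :
    ∀ (l : List β) (row : List α), (l.foldl F row).length = row.length := by
  intro l
  induction l with
  | nil => intro row; rfl
  | cons b l ih => intro row; simp [List.foldl, ih, hF]

theorem pv_len_pvUpAt (row : List String) (i : Int) : (pvUpAt row i).length = row.length := by
  unfold pvUpAt
  cases h : PySem.List.pyGet? row i <;> simp [PySem.List.length_pySetD]

theorem pv_len_pvRowWord (row : List String) (w : String) :
    (pvRowWord row w).length = row.length := by
  simp only [pvRowWord]
  split
  · exact pv_len_foldl pvUpAt pv_len_pvUpAt _ row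
  · rfl

theorem pv_len_wf (ws : List String) (row : List String) :
    (ws.foldl pvRowWord row).length = row.length :=
  pv_len_foldl pvRowWord pv_len_pvRowWord ws row

theorem pv_foldl_set_range' {α : Type} (F : Nat → α → α) (d : α) :
    ∀ (l pre : List α),
      (List.range' pre.length l.length).foldl (fun g r => g.set r (F r (g.getD r d))) (pre ++ l)
        = pre ++ l.mapIdx (fun i a => F (pre.length + i) a) := by
  intro l
  induction l with
  | nil => intro pre; simp
  | cons a l ih =>
    intro pre
    have hget : (pre ++ a :: l).getD pre.length d = a := by
      simp [List.getD_eq_getElem?_getD]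
    have hset : (pre ++ a :: l).set pre.length (F pre.length a) = (pre ++ [F pre.length a]) ++ l := by
      simp
    have hlen : pre.length + 1 = (pre ++ [F pre.length a]).length := by simp
    calc (List.range' pre.length (a :: l).length).foldl
            (fun g r => g.set r (F r (g.getD r d))) (pre ++ a :: l)
        = (List.range' (pre.length + 1) l.length).foldl
            (fun g r => g.set r (F r (g.getD r d))) ((pre ++ [F pre.length a]) ++ l) := by
          simp only [List.length_cons, List.range'_succ, List.foldl_cons, hget, hset]
      _ = (pre ++ [F pre.length a]) ++ l.mapIdx (fun i b => F ((pre ++ [F pre.length a]).length + i) b) := by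
          rw [hlen]; exact ih (pre ++ [F pre.length a])
      _ = pre ++ (a :: l).mapIdx (fun i b => F (pre.length + i) b) := by
          simp [List.mapIdx_cons]
          congr 1
          funext i b
          congr 1
          omega

theorem pv_foldl_set_range {α : Type} (F : Nat → α → α) (d : α) (l : List α) :
    (List.range l.length).foldl (fun g r => g.set r (F r (g.getD r d))) l = l.mapIdx F := by
  have := pv_foldl_set_range' F d l []
  simpa [List.range_eq_range'] using this

theorem pv_mapIdx_const {α β : Type} (f : α → β) (l : List α) :
    l.mapIdx (fun _ a => f a) = l.map f := by
  apply List.ext_getElem <;> simp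

theorem pv_rowPhase (ws : List String) (g : List (List String)) :
    (List.range g.length).foldl (fun g r => g.set r (ws.foldl pvRowWord (g.getD r []))) g
      = g.map (fun row => ws.foldl pvRowWord row) := by
  rw [pv_foldl_set_range (fun _ row => ws.foldl pvRowWord row) [] g, pv_mapIdx_const]

-- ---- column machinery (characterizing A's second pass) ----
def pvColOf (g : List (List String)) (c : Int) : List String :=
  g.map (fun row => PySem.List.pyGetD row c "")

def pvWriteCol (g : List (List String)) (c : Int) (v : List String) : List (List String) :=
  List.zipWith (fun row x => PySem.List.pySetD row c x) g v

theorem pv_len_pvColOf (g : List (List String)) (c : Int) : (pvColOf g c).length = g.length := by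
  simp [pvColOf]

theorem pv_writeCol_self {c : Int} (hc : 0 ≤ c) :
    ∀ (g : List (List String)), (∀ row ∈ g, c.toNat < row.length) →
      pvWriteCol g c (pvColOf g c) = g := by
  intro g
  induction g with
  | nil => intro _; rfl
  | cons row g ih =>
    intro hs
    have hr : c.toNat < row.length := hs row (List.mem_cons_self)
    have h1 : PySem.List.pySetD row c (PySem.List.pyGetD row c "") = row := by
      rw [PySem.List.pySetD_of_nonneg row _ hc,
          PySem.List.pyGetD_eq_getElem row "" hc (by omega),
          List.set_getElem_self]
    simp only [pvWriteCol, pvColOf, List.map_cons, List.zipWith_cons_cons, h1]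
    have := ih (fun r hrm => hs r (List.mem_cons_of_mem _ hrm))
    simp only [pvWriteCol, pvColOf] at this
    rw [this]

theorem pv_pvUpAt_eq {row : List String} {c : Int} (hc : 0 ≤ c) (hr : c.toNat < row.length) :
    pvUpAt row c = row.set c.toNat (PySem.Str.upper row[c.toNat]) := by
  unfold pvUpAt
  rw [PySem.List.pyGet?_eq_some_getElem row hc (by omega)]
  simp [PySem.List.pySetD_of_nonneg row _ hc]

theorem pv_colOf_pvCellUp {g : List (List String)} {c i : Int} (hc : 0 ≤ c) (hi : 0 ≤ i)
    (hs : ∀ row ∈ g, c.toNat < row.length) :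
    pvColOf (pvCellUp g i c) c = pvUpAt (pvColOf g c) i := by
  cases h : PySem.List.pyGet? g i with
  | none =>
    have hcell : pvCellUp g i c = g := by unfold pvCellUp; rw [h]
    have hnone : PySem.List.pyGet? (pvColOf g c) i = none := by
      rw [PySem.List.pyGet?_eq_none_iff] at h ⊢
      simpa [pv_len_pvColOf] using h
    rw [hcell]
    unfold pvUpAt
    rw [hnone]
  | some row =>
    have hcell : pvCellUp g i c = PySem.List.pySetD g i (pvUpAt row c) := by
      unfold pvCellUp; rw [h]
    rw [PySem.List.pyGet?_of_nonneg g hi] at h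
    obtain ⟨hin, hrow_eq⟩ := List.getElem?_eq_some_iff.1 h
    have hrow : c.toNat < row.length := hs row (hrow_eq ▸ g.getElem_mem hin)
    have hpg : PySem.List.pyGet? (pvColOf g c) i = some (PySem.List.pyGetD row c "") := by
      rw [PySem.List.pyGet?_of_nonneg _ hi]
      simp [pvColOf, List.getElem?_map, h]
    have hval : PySem.List.pyGetD (pvUpAt row c) c "" = PySem.Str.upper (PySem.List.pyGetD row c "") := by
      rw [pv_pvUpAt_eq hc hrow,
          PySem.List.pyGetD_eq_getElem _ "" hc (by simp only [List.length_set]; omega),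
          PySem.List.pyGetD_eq_getElem _ "" hc (by omega)]
      simp
    have hR : pvUpAt (pvColOf g c) i
        = PySem.List.pySetD (pvColOf g c) i (PySem.Str.upper (PySem.List.pyGetD row c "")) := by
      unfold pvUpAt; rw [hpg]
    rw [hcell, PySem.List.pySetD_of_nonneg g _ hi, hR, PySem.List.pySetD_of_nonneg _ _ hi]
    simp only [pvColOf, List.map_set, hval]

theorem pv_pySetD_pvUpAt {c : Int} (hc : 0 ≤ c) (row : List String) (x : String) :
    PySem.List.pySetD (pvUpAt row c) c x = PySem.List.pySetD row c x := by
  by_cases hcr : c.toNat < row.length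
  · rw [pv_pvUpAt_eq hc hcr, PySem.List.pySetD_of_nonneg _ _ hc,
        PySem.List.pySetD_of_nonneg _ _ hc, List.set_set]
  · have hid : pvUpAt row c = row := by
      unfold pvUpAt
      have hnone : PySem.List.pyGet? row c = none := by
        rw [PySem.List.pyGet?_of_nonneg _ hc, List.getElem?_eq_none_iff]
        omega
      rw [hnone]
    rw [hid]

theorem pv_writeCol_pvCellUp {g : List (List String)} {c i : Int} (hc : 0 ≤ c) (hi : 0 ≤ i)
    (v : List String) :
    pvWriteCol (pvCellUp g i c) c v = pvWriteCol g c v := by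
  cases h : PySem.List.pyGet? g i with
  | none => unfold pvCellUp; rw [h]
  | some row =>
    have hcell : pvCellUp g i c = PySem.List.pySetD g i (pvUpAt row c) := by
      unfold pvCellUp; rw [h]
    rw [PySem.List.pyGet?_of_nonneg g hi] at h
    obtain ⟨hin, hrow_eq⟩ := List.getElem?_eq_some_iff.1 h
    rw [hcell, PySem.List.pySetD_of_nonneg g _ hi]
    apply List.ext_getElem
    · simp [pvWriteCol]
    · intro j h1 h2
      have hjg : j < g.length := by simp [pvWriteCol] at h2; omega
      simp only [pvWriteCol, List.getElem_zipWith, List.getElem_set]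
      by_cases hj : i.toNat = j
      · rw [if_pos hj]
        have hgj : g[j]'hjg = row := by
          subst hj; exact hrow_eq
        rw [hgj]
        exact pv_pySetD_pvUpAt hc row _
      · rw [if_neg hj]

theorem pv_shape_pvCellUp {g : List (List String)} {c i : Int} (hi : 0 ≤ i)
    (hs : ∀ row ∈ g, c.toNat < row.length) :
    ∀ row ∈ pvCellUp g i c, c.toNat < row.length := by
  intro row' hm
  cases h : PySem.List.pyGet? g i with
  | none =>
    have hcell : pvCellUp g i c = g := by unfold pvCellUp; rw [h]
    rw [hcell] at hm
    exact hs row' hm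
  | some row =>
    have hcell : pvCellUp g i c = PySem.List.pySetD g i (pvUpAt row c) := by
      unfold pvCellUp; rw [h]
    have hrowm := PySem.List.mem_of_pyGet?_eq_some g h
    rw [hcell, PySem.List.pySetD_of_nonneg g _ hi] at hm
    rcases List.mem_or_eq_of_mem_set hm with hmem | heq
    · exact hs row' hmem
    · subst heq
      rw [pv_len_pvUpAt]
      exact hs row hrowm

theorem pv_foldl_cellUp {c : Int} (hc : 0 ≤ c) :
    ∀ (is : List Int) (g : List (List String)), (∀ i ∈ is, 0 ≤ i) →
      (∀ row ∈ g, c.toNat < row.length) →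
      is.foldl (fun g i => pvCellUp g i c) g = pvWriteCol g c (is.foldl pvUpAt (pvColOf g c)) := by
  intro is
  induction is with
  | nil => intro g _ hs; exact (pv_writeCol_self hc g hs).symm
  | cons i is ih =>
    intro g hpos hs
    have hi : 0 ≤ i := hpos i List.mem_cons_self
    simp only [List.foldl_cons]
    rw [ih (pvCellUp g i c) (fun j hj => hpos j (List.mem_cons_of_mem _ hj)) (pv_shape_pvCellUp hi hs),
        pv_colOf_pvCellUp hc hi hs, pv_writeCol_pvCellUp hc hi]

theorem pv_pvColWord_eq {g : List (List String)} {c : Int} (hc : 0 ≤ c)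
    (hs : ∀ row ∈ g, c.toNat < row.length) (w : String) :
    pvColWord g c w = pvWriteCol g c (pvRowWord (pvColOf g c) w) := by
  simp only [pvColWord, pvRowWord]
  have hcol : g.map (fun row => PySem.List.pyGetD row c "") = pvColOf g c := rfl
  rw [hcol]
  split
  · next hf =>
    apply pv_foldl_cellUp hc _ g _ hs
    intro i hi
    rcases PySem.List.mem_pyRange_one.1 hi with ⟨h1, _⟩
    omega
  · exact (pv_writeCol_self hc g hs).symm

theorem pv_len_writeCol (g : List (List String)) (c : Int) (v : List String) :
    (pvWriteCol g c v).length = min g.length v.length := by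
  simp [pvWriteCol]

theorem pv_getElem_writeCol {g : List (List String)} {c : Int} {v : List String}
    (j : Nat) (h : j < (pvWriteCol g c v).length) :
    (pvWriteCol g c v)[j] =
      PySem.List.pySetD (g[j]'(by simp [pvWriteCol] at h; omega)) c
        (v[j]'(by simp [pvWriteCol] at h; omega)) := by
  simp [pvWriteCol, List.getElem_zipWith]

theorem pv_shape_writeCol {g : List (List String)} {c : Int} {v : List String}
    (hs : ∀ row ∈ g, c.toNat < row.length) :
    ∀ row ∈ pvWriteCol g c v, c.toNat < row.length := by
  intro row' hm
  rcases List.mem_iff_getElem.1 hm with ⟨j, hj, hEq⟩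
  rw [pv_getElem_writeCol j hj] at hEq
  rw [← hEq, PySem.List.length_pySetD]
  exact hs _ (g.getElem_mem _)

theorem pv_colOf_writeCol {g : List (List String)} {c : Int} {v : List String} (hc : 0 ≤ c)
    (hs : ∀ row ∈ g, c.toNat < row.length) (hv : v.length = g.length) :
    pvColOf (pvWriteCol g c v) c = v := by
  apply List.ext_getElem
  · simp [pvColOf, pv_len_writeCol, hv]
  · intro j h1 h2
    have hj : j < g.length := by simp [pvColOf, pv_len_writeCol] at h1; omega
    simp only [pvColOf, List.getElem_map]
    rw [pv_getElem_writeCol j (by simp [pv_len_writeCol]; omega)]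
    have hr : c.toNat < (g[j]).length := hs _ (g.getElem_mem hj)
    rw [PySem.List.pySetD_of_nonneg _ _ hc,
        PySem.List.pyGetD_eq_getElem _ "" hc (by simp only [List.length_set]; omega)]
    simp

theorem pv_writeCol_writeCol {g : List (List String)} {c : Int} {v v' : List String} (hc : 0 ≤ c)
    (hv : v.length = g.length) (hv' : v'.length = g.length) :
    pvWriteCol (pvWriteCol g c v) c v' = pvWriteCol g c v' := by
  apply List.ext_getElem
  · simp [pv_len_writeCol, hv, hv']
  · intro j h1 h2
    have hj : j < g.length := by simp [pv_len_writeCol, hv, hv'] at h1; omega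
    rw [pv_getElem_writeCol j h1, pv_getElem_writeCol j h2,
        pv_getElem_writeCol j (by simp [pv_len_writeCol]; omega)]
    rw [PySem.List.pySetD_of_nonneg _ _ hc, PySem.List.pySetD_of_nonneg _ _ hc,
        PySem.List.pySetD_of_nonneg _ _ hc, List.set_set]

theorem pv_foldl_colWord {c : Int} (hc : 0 ≤ c) (ws : List String) :
    ∀ (g : List (List String)), (∀ row ∈ g, c.toNat < row.length) →
      ws.foldl (fun g w => pvColWord g c w) g = pvWriteCol g c (ws.foldl pvRowWord (pvColOf g c)) := by
  induction ws with
  | nil => intro g hs; exact (pv_writeCol_self hc g hs).symm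
  | cons w ws ih =>
    intro g hs
    have hlenv : (pvRowWord (pvColOf g c) w).length = g.length := by
      rw [pv_len_pvRowWord, pv_len_pvColOf]
    simp only [List.foldl_cons]
    rw [pv_pvColWord_eq hc hs w,
        ih _ (pv_shape_writeCol hs),
        pv_colOf_writeCol hc hs hlenv,
        pv_writeCol_writeCol hc hlenv (by rw [pv_len_wf, pv_len_pvRowWord, pv_len_pvColOf])]

-- the blended grid after the first k columns have been processed
def pvBlend (ws : List String) (g : List (List String)) (k : Nat) : List (List String) :=
  g.mapIdx (fun r row =>
    (List.range k).foldl
      (fun row (c : Nat) => PySem.List.pySetD row (c : Int)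
        ((ws.foldl pvRowWord (pvColOf g (c : Int))).getD r "")) row)

theorem pv_len_foldl_pySetD (u : Nat → String) (k : Nat) (row : List String) :
    ((List.range k).foldl (fun row (c : Nat) => PySem.List.pySetD row (c : Int) (u c)) row).length
      = row.length :=
  pv_len_foldl _ (fun r (b : Nat) => PySem.List.length_pySetD r (b : Int) (u b)) (List.range k) row

theorem pv_getElem?_foldl_pySetD (u : Nat → String) :
    ∀ (k : Nat) (row : List String) (j : Nat) (hj : j < row.length),
      ((List.range k).foldl (fun row (c : Nat) => PySem.List.pySetD row (c : Int) (u c)) row)[j]?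
        = some (if j < k then u j else row[j]'(by omega)) := by
  intro k
  induction k with
  | zero =>
    intro row j hj
    simp [List.getElem?_eq_getElem hj]
  | succ k ih =>
    intro row j hj
    rw [List.range_succ, List.foldl_append]
    simp only [List.foldl_cons, List.foldl_nil]
    rw [PySem.List.pySetD_natCast, List.getElem?_set]
    by_cases hk : k = j
    · subst hk
      rw [if_pos rfl, if_pos (by rw [pv_len_foldl_pySetD]; omega), if_pos (by omega)]
    · rw [if_neg hk, ih row j hj]
      by_cases hlt : j < k
      · rw [if_pos hlt, if_pos (by omega)]
      · rw [if_neg hlt, if_neg (by omega)]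

theorem pv_getElem_foldl_pySetD (u : Nat → String) (k : Nat) (row : List String) (j : Nat)
    (hj : j < row.length)
    (h' : j < ((List.range k).foldl (fun row (c : Nat) => PySem.List.pySetD row (c : Int) (u c)) row).length) :
    ((List.range k).foldl (fun row (c : Nat) => PySem.List.pySetD row (c : Int) (u c)) row)[j]'h'
      = if j < k then u j else row[j]'(by omega) := by
  have h := pv_getElem?_foldl_pySetD u k row j hj
  rw [List.getElem?_eq_getElem h'] at h
  exact Option.some_inj.1 h

theorem pv_len_pvBlend (ws : List String) (g : List (List String)) (k : Nat) :
    (pvBlend ws g k).length = g.length := by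
  simp [pvBlend]

theorem pv_rowlen_pvBlend (ws : List String) (g : List (List String)) (k : Nat)
    (r : Nat) (hr : r < g.length)
    (hr' : r < (pvBlend ws g k).length) :
    (((pvBlend ws g k)[r]'hr').length) = (g[r]).length := by
  simp only [pvBlend, List.getElem_mapIdx]
  rw [pv_len_foldl_pySetD]

theorem pv_getElem_pvBlend (ws : List String) (g : List (List String)) (k : Nat)
    (r : Nat) (hr : r < g.length) (j : Nat) (hj : j < (g[r]).length)
    (hr' : r < (pvBlend ws g k).length)
    (hj' : j < (((pvBlend ws g k)[r]'hr').length)) :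
    ((pvBlend ws g k)[r]'hr')[j]'hj'
      = if j < k then (ws.foldl pvRowWord (pvColOf g (j : Int))).getD r "" else (g[r])[j]'hj := by
  simp only [pvBlend, List.getElem_mapIdx]
  exact pv_getElem_foldl_pySetD _ k (g[r]) j hj (by
    simp only [pvBlend, List.getElem_mapIdx] at hj'
    exact hj')

theorem pv_colfold (ws : List String) (g : List (List String)) (W : Nat)
    (hW : ∀ row ∈ g, W ≤ row.length) :
    ∀ k, k ≤ W →
      (PySem.List.pyRange 0 (k : Int) 1).foldl
        (fun h c => ws.foldl (fun h w => pvColWord h c w) h) g = pvBlend ws g k := by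
  intro k
  induction k with
  | zero =>
    intro _
    have hb : pvBlend ws g 0 = g := by
      apply List.ext_getElem
      · simp [pv_len_pvBlend]
      · intro r h1 h2
        apply List.ext_getElem
        · rw [pv_rowlen_pvBlend ws g 0 r h2 h1]
        · intro j hj1 hj2
          rw [pv_getElem_pvBlend ws g 0 r h2 j hj2 h1 hj1]
          simp
    rw [PySem.List.pyRange_one_eq_nil (by omega), List.foldl_nil, hb]
  | succ k ih =>
    intro hk
    have hk' : k ≤ W := by omega
    have hcast : ((k + 1 : Nat) : Int) = (k : Int) + 1 := by push_cast; ring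
    rw [hcast, PySem.List.pyRange_one_succ_right (by omega), List.foldl_append]
    simp only [List.foldl_cons, List.foldl_nil]
    rw [ih hk']
    have hshape : ∀ row ∈ pvBlend ws g k, (k : Int).toNat < row.length := by
      intro row hm
      rcases List.mem_iff_getElem.1 hm with ⟨r, hr, hEq⟩
      have hr' : r < g.length := by rw [pv_len_pvBlend] at hr; exact hr
      rw [← hEq, pv_rowlen_pvBlend ws g k r hr' hr]
      have := hW _ (g.getElem_mem hr')
      omega
    rw [pv_foldl_colWord (by omega) ws _ hshape]
    have hcol : pvColOf (pvBlend ws g k) (k : Int) = pvColOf g (k : Int) := by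
      apply List.ext_getElem
      · simp [pvColOf, pv_len_pvBlend]
      · intro r h1 h2
        have hr : r < g.length := by simp [pvColOf, pv_len_pvBlend] at h1; omega
        have hwr : W ≤ (g[r]).length := hW _ (g.getElem_mem hr)
        simp only [pvColOf, List.getElem_map]
        rw [PySem.List.pyGetD_eq_getElem _ "" (by omega)
              (by rw [pv_rowlen_pvBlend ws g k r hr (by rw [pv_len_pvBlend]; exact hr)]
                  exact_mod_cast (by omega : (k:Int) < ((g[r]).length : Int))),
            PySem.List.pyGetD_eq_getElem _ "" (by omega)
              (by exact_mod_cast (by omega : (k:Int) < ((g[r]).length : Int)))]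
        simp only [Int.toNat_natCast]
        rw [pv_getElem_pvBlend ws g k r hr k (by omega), if_neg (by omega)]
    rw [hcol]
    apply List.ext_getElem
    · rw [pv_len_writeCol, pv_len_pvBlend, pv_len_pvBlend, pv_len_wf, pv_len_pvColOf]
      omega
    · intro r h1 h2
      have hr : r < g.length := by
        rw [pv_len_writeCol, pv_len_pvBlend, pv_len_wf, pv_len_pvColOf] at h1; omega
      have hwr : W ≤ (g[r]).length := hW _ (g.getElem_mem hr)
      have hbr : r < (pvBlend ws g k).length := by rw [pv_len_pvBlend]; exact hr
      have hbr' : r < (pvBlend ws g (k+1)).length := by rw [pv_len_pvBlend]; exact hr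
      rw [pv_getElem_writeCol r h1, PySem.List.pySetD_of_nonneg _ _ (by omega : (0:Int) ≤ (k:Int))]
      simp only [Int.toNat_natCast]
      apply List.ext_getElem
      · rw [List.length_set, pv_rowlen_pvBlend ws g k r hr hbr,
            pv_rowlen_pvBlend ws g (k+1) r hr hbr']
      · intro j hj1 hj2
        have hjg : j < (g[r]).length := by
          rw [List.length_set, pv_rowlen_pvBlend ws g k r hr hbr] at hj1; exact hj1
        rw [List.getElem_set, pv_getElem_pvBlend ws g (k+1) r hr j hjg hbr' hj2]
        by_cases hkj : k = j
        · rw [if_pos hkj, if_pos (by omega)]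
          subst hkj
          rw [List.getD_eq_getElem?_getD,
              List.getElem?_eq_getElem (by
                rw [pv_len_wf, pv_len_pvColOf]; exact hr)]
          rfl
        · rw [if_neg hkj,
              pv_getElem_pvBlend ws g k r hr j hjg hbr (by
                rw [pv_rowlen_pvBlend ws g k r hr hbr]; exact hjg)]
          by_cases hlt : j < k
          · rw [if_pos hlt, if_pos (by omega)]
          · rw [if_neg hlt, if_neg (by omega)]

-- ---- pvMinLen under the shape hypothesis ----
theorem pv_le_pvMinLen (k : Nat) : ∀ (rs : List (List String)) (s : List String),
    k ≤ s.length → (∀ row ∈ rs, k ≤ row.length) → k ≤ pvMinLen (s :: rs) := by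
  intro rs
  induction rs with
  | nil => intro s hs _; simpa [pvMinLen] using hs
  | cons t rs ih =>
    intro s hs hall
    have := ih t (hall t List.mem_cons_self) (fun r hr => hall r (List.mem_cons_of_mem _ hr))
    simp only [pvMinLen]
    omega

theorem pv_minLen_eq (r : List String) (rs : List (List String))
    (h : ∀ row ∈ rs, r.length ≤ row.length) : pvMinLen (r :: rs) = r.length := by
  cases rs with
  | nil => rfl
  | cons s rs =>
    have h1 := pv_le_pvMinLen r.length rs s (h s List.mem_cons_self)
      (fun row hm => h row (List.mem_cons_of_mem _ hm))
    simp only [pvMinLen] at *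
    omega

-- ---- the main equivalence ----
theorem pv_alt_nilwords (g : List (List String)) : capitalize_word_in_crossword_alt g [] = g := by
  simp only [capitalize_word_in_crossword_alt]
  apply List.ext_getElem
  · simp
  · intro r h1 h2
    rw [List.getElem_mapIdx]
    rw [pv_rebuild_eq, pv_pvApply_congr (q := fun _ => false) (fun c => ?_) _, pv_pvApply_false]
    have hnil : ∀ (gl : List (List String)) (k : Nat),
        (gl.map (fun line => pvLineSpans line ([] : List String))).getD k [] = ([] : PySem.Set Int) := by
      intro gl k
      rw [List.getD_eq_getElem?_getD, List.getElem?_map]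
      cases gl[k]? <;> rfl
    rw [hnil, hnil]
    simp

theorem pv_A_nilwords (g : List (List String)) : capitalize_word_in_crossword g [] = g := by
  simp only [capitalize_word_in_crossword]
  rw [pv_rowPhase [] g]
  have hmap : g.map (fun row => List.foldl pvRowWord row []) = g := by simp
  rw [hmap]
  exact List.foldl_fixed _

-- a cell of the row-passed grid, in marked form
theorem pv_g1_row (g : List (List String)) (words : List String) (r : Nat) (hr : r < g.length)
    (hr1 : r < (g.map (fun row => words.foldl pvRowWord row)).length) :
    (g.map (fun row => words.foldl pvRowWord row))[r]'hr1
      = pvApply (pvMarkB (pvLowS (g[r]'hr)) words) (g[r]'hr) := by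
  rw [List.getElem_map]
  exact pv_rowFold_eq words _

theorem pv_main (g : List (List String)) (words : List String)
    (hne : g ≠ [])
    (hshape : words = [] ∨ ∀ row ∈ g, (g.headD []).length ≤ row.length) :
    capitalize_word_in_crossword g words = capitalize_word_in_crossword_alt g words := by
  rcases hshape with hw | hsh
  · subst hw
    rw [pv_A_nilwords, pv_alt_nilwords]
  · have hlen1 : (g.map (fun row => words.foldl pvRowWord row)).length = g.length := by simp
    have hW0 : (((g.map (fun row => words.foldl pvRowWord row)).getD 0 []).length) = (g.headD []).length := by
      cases g with
      | nil => exact absurd rfl hne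
      | cons r0 rest => simp [pv_len_wf]
    have hWg0 : ∀ row ∈ g, (((g.map (fun row => words.foldl pvRowWord row)).getD 0 []).length) ≤ row.length := by
      intro row hm
      rw [hW0]
      exact hsh row hm
    have hWg1 : ∀ row ∈ (g.map (fun row => words.foldl pvRowWord row)),
        (((g.map (fun row => words.foldl pvRowWord row)).getD 0 []).length) ≤ row.length := by
      intro row hm
      rcases List.mem_map.1 hm with ⟨row0, hm0, hEq⟩
      rw [← hEq, pv_len_wf]
      exact hWg0 row0 hm0
    have hminlen : pvMinLen g = (((g.map (fun row => words.foldl pvRowWord row)).getD 0 []).length) := by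
      cases g with
      | nil => exact absurd rfl hne
      | cons r0 rest =>
        rw [pv_minLen_eq r0 rest (fun row hm => by
          have := hsh row (List.mem_cons_of_mem _ hm)
          simpa using this), hW0]
        rfl
    have hA : capitalize_word_in_crossword g words
        = pvBlend words (g.map (fun row => words.foldl pvRowWord row))
            (((g.map (fun row => words.foldl pvRowWord row)).getD 0 []).length) := by
      simp only [capitalize_word_in_crossword]
      rw [pv_rowPhase words g]
      exact pv_colfold words _ _ hWg1 _ (le_refl _)
    rw [hA]
    simp only [capitalize_word_in_crossword_alt]
    apply List.ext_getElem
    · simp [pv_len_pvBlend, hlen1]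
    · intro r h1 h2
      have hr : r < g.length := by simpa using h2
      have hr1 : r < (g.map (fun row => words.foldl pvRowWord row)).length := by omega
      rw [List.getElem_mapIdx, pv_rebuild_eq]
      apply List.ext_getElem
      · rw [pv_rowlen_pvBlend words _ _ r hr1 h1, pv_len_pvApply,
            pv_g1_row g words r hr hr1, pv_len_pvApply]
      · intro c hc1 hc2
        have hcg : c < (g[r]'hr).length := by
          rw [pv_len_pvApply] at hc2
          exact hc2
        have hcg1 : c < ((g.map (fun row => words.foldl pvRowWord row))[r]'hr1).length := by
          rw [pv_g1_row g words r hr hr1, pv_len_pvApply]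
          exact hcg
        rw [pv_getElem_pvApply _ _ c hc2]
        rw [pv_getElem_pvBlend words _ _ r hr1 c hcg1 h1 hc1]
        have hrowmark : PySem.Set.contains
            ((g.map (fun row => pvLineSpans row words)).getD r []) ((c : Nat) : Int)
            = pvMarkB (pvLowS (g[r]'hr)) words c := by
          rw [List.getD_eq_getElem?_getD, List.getElem?_map, List.getElem?_eq_getElem hr]
          exact pv_contains_lineSpans _ words c
        have hcolLen : ((pvZipCols g).map (fun col => pvLineSpans col words)).length
            = (((g.map (fun row => words.foldl pvRowWord row)).getD 0 []).length) := by
          simp [pvZipCols, hminlen]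
        have hcellg1 : ((g.map (fun row => words.foldl pvRowWord row))[r]'hr1)[c]'hcg1
            = if pvMarkB (pvLowS (g[r]'hr)) words c
              then PySem.Str.upper ((g[r]'hr)[c]'hcg) else (g[r]'hr)[c]'hcg := by
          rw [List.getElem_of_eq (pv_g1_row g words r hr hr1) hcg1]
          exact pv_getElem_pvApply _ _ c (by rw [pv_len_pvApply]; exact hcg)
        by_cases hcW : c < (((g.map (fun row => words.foldl pvRowWord row)).getD 0 []).length)
        · -- in-range column: both sides consult the column marks
          have hcolmark : PySem.Set.contains
              (((pvZipCols g).map (fun col => pvLineSpans col words)).getD c []) ((r : Nat) : Int)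
              = pvMarkB (pvLowS (g.map (fun row => row.getD c ""))) words r := by
            rw [List.getD_eq_getElem?_getD, List.getElem?_map]
            have hzc : (pvZipCols g)[c]? = some (g.map (fun row => row.getD c "")) := by
              rw [pvZipCols, List.getElem?_map, List.getElem?_range (by rw [hminlen]; exact hcW)]
              rfl
            rw [hzc]
            exact pv_contains_lineSpans _ words r
          have hcolOfLen : r < (pvColOf (g.map (fun row => words.foldl pvRowWord row)) (c : Int)).length := by
            rw [pv_len_pvColOf]; omega
          have hlowcol : pvLowS (pvColOf (g.map (fun row => words.foldl pvRowWord row)) (c : Int))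
              = pvLowS (g.map (fun row => row.getD c "")) := by
            apply pv_lowS_congr
            · simp [pvColOf]
            · intro r' hl1 hl2
              have hr' : r' < g.length := by simpa [pvColOf] using hl1
              have hr'1 : r' < (g.map (fun row => words.foldl pvRowWord row)).length := by omega
              have hcr' : c < (g[r']'hr').length := by
                have := hWg0 _ (g.getElem_mem hr')
                omega
              simp only [pvColOf, List.getElem_map]
              rw [pv_rowFold_eq words]
              rw [PySem.List.pyGetD_natCast, List.getD_eq_getElem?_getD,
                  List.getElem?_eq_getElem (by rw [pv_len_pvApply]; exact hcr'),
                  List.getD_eq_getElem?_getD, List.getElem?_eq_getElem hcr']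
              simp only [Option.getD_some]
              rw [pv_getElem_pvApply _ _ c (by rw [pv_len_pvApply]; exact hcr')]
              split
              · exact pv_lower_upper_toList _
              · rfl
          have hcolentry : (pvColOf (g.map (fun row => words.foldl pvRowWord row)) (c : Int))[r]'hcolOfLen
              = if pvMarkB (pvLowS (g[r]'hr)) words c
                then PySem.Str.upper ((g[r]'hr)[c]'hcg) else (g[r]'hr)[c]'hcg := by
            simp only [pvColOf, List.getElem_map]
            rw [pv_rowFold_eq words]
            rw [PySem.List.pyGetD_natCast, List.getD_eq_getElem?_getD,
                List.getElem?_eq_getElem (by rw [pv_len_pvApply]; exact hcg), Option.getD_some]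
            exact pv_getElem_pvApply _ _ c (by rw [pv_len_pvApply]; exact hcg)
          rw [if_pos hcW]
          rw [pv_rowFold_eq words (pvColOf (g.map (fun row => words.foldl pvRowWord row)) (c : Int)),
              List.getD_eq_getElem?_getD,
              List.getElem?_eq_getElem (by rw [pv_len_pvApply]; exact hcolOfLen), Option.getD_some,
              pv_getElem_pvApply _ _ r (by rw [pv_len_pvApply]; exact hcolOfLen),
              hlowcol, hcolentry, hrowmark, hcolmark,
              decide_eq_true (show c < ((pvZipCols g).map (fun col => pvLineSpans col words)).length by
                rw [hcolLen]; exact hcW), Bool.true_and]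
          cases hm1 : pvMarkB (pvLowS (g[r]'hr)) words c <;>
            cases hm2 : pvMarkB (pvLowS (g.map (fun row => row.getD c ""))) words r <;>
            simp [pv_upper_idem]
        · -- past the columns: only the row marks apply
          rw [if_neg hcW, hcellg1, hrowmark,
              decide_eq_false (show ¬ c < ((pvZipCols g).map (fun col => pvLineSpans col words)).length by
                rw [hcolLen]; exact hcW), Bool.false_and, Bool.or_false]

-- ===== VERDICT (by name: the statement is the Claim_ definition above) =====
theorem capitalize_word_in_crossword_spec : Claim_equal_capitalize_word_in_crossword := by
  intro g words _hdom hpre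
  exact pv_main g words hpre.1 hpre.2.1
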